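-- pv_equiv track=rewrite | github.com/HantsonAlec/Algo-task | BestAlgorithm.py | set_x
-- ===== SOURCE A (Python) =====
-- def set_x(Startboard2):
--     x = []
--     minimum = min(Startboard2, key=lambda x: x[0])
--     min_val = minimum[0]
--     for i in Startboard2:
--         if i[0] == min_val:
--             x.append(i)
--     return x
-- ===== SOURCE B (Python) =====
-- def set_x(Startboard2):
--     # Single pass: keep the running minimum first-coordinate and the items attaining it.
--     acc = []
--     best = None
--     for i in Startboard2:
--         if best is None or i[0] < best:
--             best = i[0]
--             acc = [i]
--         elif i[0] == best:
--             acc.append(i)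
--     return acc
-- ===== Notes on version B (the rewrite author's own statement) =====
-- stated objective: alternative
-- what changed: Replaces A's two passes (min() over the list, then a filtering loop) by one pass maintaining a running minimum first-coordinate and an accumulator that is reset on a new minimum.
import Mathlib
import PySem

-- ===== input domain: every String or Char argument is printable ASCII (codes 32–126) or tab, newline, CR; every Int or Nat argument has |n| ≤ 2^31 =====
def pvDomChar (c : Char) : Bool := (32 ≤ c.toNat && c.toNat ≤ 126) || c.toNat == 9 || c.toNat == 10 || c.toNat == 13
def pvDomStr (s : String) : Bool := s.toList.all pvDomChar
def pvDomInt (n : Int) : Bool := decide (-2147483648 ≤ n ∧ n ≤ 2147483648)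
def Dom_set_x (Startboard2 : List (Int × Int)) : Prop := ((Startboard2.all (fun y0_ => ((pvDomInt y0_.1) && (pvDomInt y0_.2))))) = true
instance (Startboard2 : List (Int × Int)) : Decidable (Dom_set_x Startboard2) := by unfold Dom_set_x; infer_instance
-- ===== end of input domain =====

-- B changes A's two passes (min(), then a filter loop) into one pass with a running minimum;
-- same cost class, one traversal. On the empty list A raises (min()); outside Pre_, B returns [].

-- ===== PORT A =====
-- x = []; minimum = min(Startboard2, key=λx.x[0]); min_val = minimum[0]; append each i with i[0]==min_val
def set_x (Startboard2 : List (Int × Int)) : List (Int × Int) :=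
  match PySem.List.min? Startboard2 (fun x => x.1) with
  | none => []   -- Python raises ValueError here; excluded by Pre_set_x
  | some minimum =>
      let min_val := minimum.1
      Startboard2.foldl (fun x i => if i.1 = min_val then x ++ [i] else x) []

-- ===== PORT B =====
def set_x_alt (Startboard2 : List (Int × Int)) : List (Int × Int) :=
  (Startboard2.foldl
    (fun st i =>
      match st.1 with
      | none => (some i.1, [i])
      | some best =>
          if i.1 < best then (some i.1, [i])
          else if i.1 = best then (st.1, st.2 ++ [i])
          else st)
    ((none : Option Int), ([] : List (Int × Int)))).2

-- ===== PRECONDITION & SPEC =====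
-- Pre_ excludes the empty list, on which Python's min() raises ValueError (B would return [] there).
def Pre_set_x (Startboard2 : List (Int × Int)) : Prop := Startboard2 ≠ []
instance (Startboard2 : List (Int × Int)) : Decidable (Pre_set_x Startboard2) := by unfold Pre_set_x; infer_instance
def pvWitness_set_x : (List (Int × Int)) := [(1, 2), (0, 3), (0, 5)]

def Spec_set_x (Startboard2 : List (Int × Int)) (out : List (Int × Int)) : Prop := out = set_x_alt Startboard2
instance (Startboard2 : List (Int × Int)) (out : List (Int × Int)) : Decidable (Spec_set_x Startboard2 out) := by unfold Spec_set_x; infer_instance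

-- ===== CLAIM (what is proved, stated in full; the proofs are below) =====
def Claim_equal_set_x : Prop := ∀ (Startboard2 : List (Int × Int)), Dom_set_x Startboard2 → Pre_set_x Startboard2 → Spec_set_x Startboard2 (set_x Startboard2)

-- ===== LEMMAS AND PROOFS =====

-- running minimum of the first coordinates, seeded with b
def mk (l : List (Int × Int)) (b : Int) : Int := l.foldl (fun m i => min m i.1) b

theorem mk_append (l₁ l₂ : List (Int × Int)) (b : Int) : mk (l₁ ++ l₂) b = mk l₂ (mk l₁ b) := by
  simp [mk, List.foldl_append]

theorem mk_le_seed (l : List (Int × Int)) (b : Int) : mk l b ≤ b := by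
  induction l generalizing b with
  | nil => simp [mk]
  | cons i t ih => exact le_trans (ih (min b i.1)) (min_le_left _ _)

theorem mk_le_mem (l : List (Int × Int)) (b : Int) : ∀ i ∈ l, mk l b ≤ i.1 := by
  induction l generalizing b with
  | nil => simp
  | cons j t ih =>
    intro i hi
    rcases List.mem_cons.1 hi with h | h
    · subst h
      exact le_trans (mk_le_seed t (min b i.1)) (min_le_right _ _)
    · exact ih (min b j.1) i h

theorem mk_attained (l : List (Int × Int)) (b : Int) : mk l b = b ∨ ∃ i ∈ l, mk l b = i.1 := by
  induction l generalizing b with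
  | nil => left; rfl
  | cons j t ih =>
    rcases ih (min b j.1) with h | ⟨i, hi, h⟩
    · show mk t (min b j.1) = b ∨ _
      rcases le_total b j.1 with hb | hb
      · left; show mk t (min b j.1) = b; rw [h, min_eq_left hb]
      · right; exact ⟨j, List.mem_cons_self, by show mk t (min b j.1) = j.1; rw [h, min_eq_right hb]⟩
    · right; exact ⟨i, List.mem_cons_of_mem _ hi, h⟩

-- B's step function
def bstep (st : Option Int × List (Int × Int)) (i : Int × Int) : Option Int × List (Int × Int) :=
  match st.1 with
  | none => (some i.1, [i])
  | some best =>
      if i.1 < best then (some i.1, [i])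
      else if i.1 = best then (st.1, st.2 ++ [i])
      else st

theorem set_x_alt_eq_foldl (S : List (Int × Int)) : set_x_alt S = (S.foldl bstep (none, [])).2 := rfl

theorem filter_lt (p : List (Int × Int)) (v w : Int) (h : ∀ i ∈ p, w ≤ i.1) (hvw : v < w) :
    p.filter (fun i => i.1 == v) = [] := by
  rw [List.filter_eq_nil_iff]
  intro i hi
  simp only [beq_iff_eq]
  exact fun he => absurd hvw (by rw [← he]; exact not_lt.2 (h i hi))

-- loop invariant: after a nonempty prefix x :: p, the state is the running min and the filtered prefix
theorem bloop_inv (l : List (Int × Int)) : ∀ (x : Int × Int) (p : List (Int × Int)),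
    l.foldl bstep (some (mk p x.1), (x :: p).filter (fun i => i.1 == mk p x.1))
      = (some (mk (p ++ l) x.1), ((x :: p) ++ l).filter (fun i => i.1 == mk (p ++ l) x.1)) := by
  induction l with
  | nil => intro x p; simp
  | cons i t ih =>
    intro x p
    have hstep : bstep (some (mk p x.1), (x :: p).filter (fun j => j.1 == mk p x.1)) i
        = (some (mk (p ++ [i]) x.1), (x :: (p ++ [i])).filter (fun j => j.1 == mk (p ++ [i]) x.1)) := by
      have hcons : x :: (p ++ [i]) = (x :: p) ++ [i] := rfl
      have hmin : mk (p ++ [i]) x.1 = min (mk p x.1) i.1 := by simp [mk_append, mk]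
      by_cases hlt : i.1 < mk p x.1
      · have hm : mk (p ++ [i]) x.1 = i.1 := by rw [hmin, min_eq_right (le_of_lt hlt)]
        have hbound : ∀ j ∈ x :: p, mk p x.1 ≤ j.1 := by
          intro j hj
          rcases List.mem_cons.1 hj with h | h
          · subst h; exact mk_le_seed p j.1
          · exact mk_le_mem p x.1 j h
        have hfil : (x :: (p ++ [i])).filter (fun j => j.1 == mk (p ++ [i]) x.1) = [i] := by
          rw [hm, hcons, List.filter_append, filter_lt (x :: p) i.1 (mk p x.1) hbound hlt]
          simp
        rw [hfil]; simp [bstep, hlt, hm]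
      · by_cases heq : i.1 = mk p x.1
        · have hm : mk (p ++ [i]) x.1 = mk p x.1 := by rw [hmin, heq, min_self]
          have hfil : (x :: (p ++ [i])).filter (fun j => j.1 == mk (p ++ [i]) x.1)
              = (x :: p).filter (fun j => j.1 == mk p x.1) ++ [i] := by
            rw [hm, hcons, List.filter_append]
            simp [heq]
          rw [hfil]; simp [bstep, hlt, heq, hm]
        · have hm : mk (p ++ [i]) x.1 = mk p x.1 := by
            rw [hmin, min_eq_left (le_of_lt (lt_of_le_of_ne (not_lt.1 hlt) (fun h => heq h.symm)))]
          have hfil : (x :: (p ++ [i])).filter (fun j => j.1 == mk (p ++ [i]) x.1)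
              = (x :: p).filter (fun j => j.1 == mk p x.1) := by
            rw [hm, hcons, List.filter_append]
            simp [heq]
          rw [hfil]; simp [bstep, hlt, heq, hm]
    rw [List.foldl_cons, hstep, ih x (p ++ [i])]
    simp
theorem alt_eq_filter (x : Int × Int) (t : List (Int × Int)) :
    set_x_alt (x :: t) = (x :: t).filter (fun i => i.1 == mk t x.1) := by
  rw [set_x_alt_eq_foldl, List.foldl_cons]
  have h0 : bstep (none, []) x = (some (mk ([] : List (Int × Int)) x.1),
      (x :: ([] : List (Int × Int))).filter (fun i => i.1 == mk ([] : List (Int × Int)) x.1)) := by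
    simp [bstep, mk]
  rw [h0, bloop_inv t x []]
  simp

theorem a_foldl_filter (l : List (Int × Int)) (v : Int) : ∀ acc,
    l.foldl (fun x i => if i.1 = v then x ++ [i] else x) acc = acc ++ l.filter (fun i => i.1 == v) := by
  induction l with
  | nil => simp
  | cons i t ih =>
    intro acc
    by_cases h : i.1 = v
    · simp [h, ih]
    · simp [h, ih]

-- ===== VERDICT (by name: the statement is the Claim_ definition above) =====
theorem set_x_spec : Claim_equal_set_x := by
  intro S _ hpre
  unfold Spec_set_x
  match S, hpre with
  | x :: t, _ =>
    obtain ⟨m, hm⟩ : ∃ m, PySem.List.min? (x :: t) (fun y => y.1) = some m := by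
      cases h : PySem.List.min? (x :: t) (fun y => y.1) with
      | none => exact absurd ((PySem.List.min?_eq_none_iff _ _).1 h) (by simp)
      | some m => exact ⟨m, rfl⟩
    have hmem := PySem.List.min?_mem hm
    have hmin := PySem.List.min?_isMin hm
    have hkey : m.1 = mk t x.1 := by
      have h1 : mk t x.1 ≤ m.1 := by
        rcases List.mem_cons.1 hmem with h | h
        · subst h; exact mk_le_seed t m.1
        · exact mk_le_mem t x.1 m h
      have h2 : m.1 ≤ mk t x.1 := by
        rcases mk_attained t x.1 with h | ⟨i, hi, h⟩
        · rw [h]; exact hmin x List.mem_cons_self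
        · rw [h]; exact hmin i (List.mem_cons_of_mem _ hi)
      omega
    rw [set_x, hm]
    show (x :: t).foldl (fun acc i => if i.1 = m.1 then acc ++ [i] else acc) [] = _
    rw [a_foldl_filter (x :: t) m.1 [], alt_eq_filter, hkey]
    simp
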